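-- pv_equiv track=rewrite | github.com/cttavares/quindcert | src/base/state_generation_helpers.py | generate_initial_states
-- ===== SOURCE A (Python) =====
-- from typing import List, Tuple, Dict
--
-- def generate_a_state_with_n_photons(n: int, modes: int) -> str:
--     """
--     Generate a state with a given number of photons and modes.
--
--     Parameters:
--     n (int): The number of photons.
--     modes (int): The number of modes.
--
--     Returns:
--     str: The generated state.
--     """
--     state = '|'
--     i = 0
--
--     while i < modes:
--         if (i > 0):
--             state+= ','
--         if n >= 1:
--             state+= '1'
--             n-=1
--         else:
--             state+= '0'
--         i+=1
--
--     state += '>'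
--     return state
--
-- def generate_initial_states(all_possible_partitions: List[List[int]], modes: int) -> Dict[str, Dict[str, int]]:
--     """
--     Generate initial states for all possible partitions.
--
--     Parameters:
--     all_possible_partitions (List[List[int]]): The list of all possible partitions.
--     modes (int): The number of modes.
--
--     Returns:
--     Dict[str, Dict[str, int]]: The generated initial states.
--     """
--     all_states = {}
--     for p in all_possible_partitions:
--         part_dict = {}
--         for a in p:
--             state = generate_a_state_with_n_photons (a, modes)
--             if state in part_dict:
--                 part_dict [state]+=1
--             else:
--                 part_dict [state] = 1
--             key = ' '.join(map(str, p))
--             all_states[key] = part_dict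
--     return all_states
-- ===== SOURCE B (Python) =====
-- from typing import List, Dict
--
-- def generate_a_state_with_n_photons(n: int, modes: int) -> str:
--     ones = min(max(n, 0), modes)
--     return '|' + ','.join(['1'] * ones + ['0'] * (modes - ones)) + '>'
--
-- def generate_initial_states(all_possible_partitions: List[List[int]], modes: int) -> Dict[str, Dict[str, int]]:
--     all_states = {}
--     for p in all_possible_partitions:
--         if p:
--             key = ' '.join(map(str, p))
--             states = [generate_a_state_with_n_photons(a, modes) for a in p]
--             all_states[key] = {s: states.count(s) for s in dict.fromkeys(states)}
--     return all_states
-- ===== Notes on version B (the rewrite author's own statement) =====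
-- stated objective: simpler
-- what changed: The helper's per-character decrement-and-branch while loop is replaced by a closed-form photon count with bulk list construction and one join, and the main routine's incremental per-photon dict updates with repeated key re-assignment are replaced by computing the key once per non-empty partition and counting states with a dedup-and-count comprehension.
import Mathlib
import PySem

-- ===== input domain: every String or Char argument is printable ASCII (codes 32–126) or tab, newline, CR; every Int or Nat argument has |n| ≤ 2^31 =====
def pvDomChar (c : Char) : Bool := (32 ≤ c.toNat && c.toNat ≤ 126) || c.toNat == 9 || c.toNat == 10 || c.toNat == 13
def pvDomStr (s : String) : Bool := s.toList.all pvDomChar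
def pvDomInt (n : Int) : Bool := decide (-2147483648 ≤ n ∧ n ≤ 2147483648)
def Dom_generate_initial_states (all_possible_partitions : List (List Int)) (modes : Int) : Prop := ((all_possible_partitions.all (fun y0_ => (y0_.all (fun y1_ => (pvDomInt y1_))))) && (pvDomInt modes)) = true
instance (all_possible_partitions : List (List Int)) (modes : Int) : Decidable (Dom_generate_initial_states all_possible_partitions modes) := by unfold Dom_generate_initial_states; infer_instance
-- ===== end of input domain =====

-- B replaces the helper's decrement-and-branch while loop by a closed-form photon
-- count with bulk string construction, and the main routine's per-element dict
-- re-assignment by one two-pass count per non-empty partition (objective: simpler).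

-- ===== PORT A =====
-- the while loop of generate_a_state_with_n_photons: fuel = number of remaining iterations
def pvALoop : Nat → Int → Int → Int → List Char → List Char
  | 0, _, _, _, st => st
  | f+1, n, i, modes, st =>
    if i < modes then
      let st := if 0 < i then st ++ [','] else st
      if 1 ≤ n then pvALoop f (n-1) (i+1) modes (st ++ ['1'])
      else pvALoop f n (i+1) modes (st ++ ['0'])
    else st

def pvGenA (n modes : Int) : String :=
  String.mk (pvALoop modes.toNat n 0 modes ['|'] ++ ['>'])

-- inner loop body of A over one partition p (state = (part_dict, all_states))
def pvAStep (modes : Int) (key : String)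
    (st : PySem.Dict String Int × PySem.Dict String (PySem.Dict String Int)) (a : Int) :
    PySem.Dict String Int × PySem.Dict String (PySem.Dict String Int) :=
  let state := pvGenA a modes
  let pd := if st.1.contains state then st.1.insert state (st.1.getD state 0 + 1)
            else st.1.insert state 1
  (pd, st.2.insert key pd)

def generate_initial_states (all_possible_partitions : List (List Int)) (modes : Int) :
    List (String × List (String × Int)) :=
  (all_possible_partitions.foldl
    (fun all p =>
      (p.foldl (pvAStep modes (PySem.Str.join " " (p.map PySem.Int.toStr)))
        (PySem.Dict.empty, all)).2)
    PySem.Dict.empty).items.map (fun kv => (kv.1, kv.2.items))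

-- ===== PORT B =====
def pvGenAlt (n modes : Int) : String :=
  let ones := min (max n 0) modes
  String.mk ('|' :: PySem.Chars.join [',']
      (List.replicate ones.toNat ['1'] ++ List.replicate (modes - ones).toNat ['0']) ++ ['>'])

def generate_initial_states_alt (all_possible_partitions : List (List Int)) (modes : Int) :
    List (String × List (String × Int)) :=
  (all_possible_partitions.foldl
    (fun all p =>
      if p.isEmpty then all
      else
        let key := PySem.Str.join " " (p.map PySem.Int.toStr)
        let states := p.map (fun a => pvGenAlt a modes)
        all.insert key
          ((PySem.List.dedup states).foldl
            (fun d s => d.insert s ((states.count s : Int))) PySem.Dict.empty))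
    PySem.Dict.empty).items.map (fun kv => (kv.1, kv.2.items))

-- ===== PRECONDITION & SPEC =====
def Spec_generate_initial_states (all_possible_partitions : List (List Int)) (modes : Int) (out : List (String × List (String × Int))) : Prop := out = generate_initial_states_alt all_possible_partitions modes
instance (all_possible_partitions : List (List Int)) (modes : Int) (out : List (String × List (String × Int))) : Decidable (Spec_generate_initial_states all_possible_partitions modes out) := by unfold Spec_generate_initial_states; infer_instance

-- ===== CLAIM (what is proved, stated in full; the proofs are below) =====
def Claim_equal_generate_initial_states : Prop := ∀ (all_possible_partitions : List (List Int)) (modes : Int), Dom_generate_initial_states all_possible_partitions modes → Spec_generate_initial_states all_possible_partitions modes (generate_initial_states all_possible_partitions modes)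

-- ===== LEMMAS AND PROOFS =====

-- the sequence of '1'/'0' characters A's loop emits, given fuel and remaining photons
def pvBits : Nat → Int → List Char
  | 0, _ => []
  | f+1, n => (if 1 ≤ n then '1' else '0') :: pvBits f (if 1 ≤ n then n - 1 else n)

-- A's loop at i > 0 appends ",bit" per iteration
theorem pvALoop_pos : ∀ (f : Nat) (n i modes : Int) (st : List Char), 0 < i → i + f ≤ modes →
    pvALoop f n i modes st = st ++ (pvBits f n).flatMap (fun c => [',', c]) := by
  intro f
  induction f with
  | zero => intro n i modes st _ _; simp [pvALoop, pvBits]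
  | succ f ih =>
    intro n i modes st hi hle
    have hlt : i < modes := by omega
    simp only [pvALoop, if_pos hlt, if_pos hi]
    have hle' : (i + 1) + (f : Int) ≤ modes := by push_cast at hle; omega
    by_cases hn : 1 ≤ n
    · rw [if_pos hn, ih (n-1) (i+1) modes _ (by omega) hle']
      simp [pvBits, hn, List.flatMap_cons]
    · rw [if_neg hn, ih n (i+1) modes _ (by omega) hle']
      simp [pvBits, hn, List.flatMap_cons]

theorem pvBits_replicate : ∀ (f : Nat) (n : Int),
    pvBits f n = List.replicate (min (max n 0) (f : Int)).toNat '1'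
        ++ List.replicate ((f : Int) - min (max n 0) (f : Int)).toNat '0' := by
  intro f
  induction f with
  | zero =>
    intro n
    simp [pvBits]
  | succ f ih =>
    intro n
    by_cases hn : 1 ≤ n
    · have h1 : (min (max n 0) ((f : Int) + 1)).toNat = (min (max (n-1) 0) (f : Int)).toNat + 1 := by omega
      have h2 : (((f : Int) + 1) - min (max n 0) ((f:Int)+1)).toNat = ((f : Int) - min (max (n-1) 0) (f : Int)).toNat := by omega
      simp only [pvBits, if_pos hn, ih]
      push_cast
      rw [h1, h2, List.replicate_succ]
      simp
    · have h1 : (min (max n 0) ((f : Int) + 1)).toNat = 0 := by omega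
      have h1' : (min (max n 0) ((f : Int))).toNat = 0 := by omega
      have h2 : (((f : Int) + 1) - min (max n 0) ((f:Int)+1)).toNat = ((f : Int) - min (max n 0) (f : Int)).toNat + 1 := by omega
      simp only [pvBits, if_neg hn, ih]
      push_cast
      rw [h1, h1', h2, List.replicate_succ]
      simp

-- join with "," on singleton chunks
theorem pvJoin_singletons : ∀ (c : Char) (cs : List Char),
    PySem.Chars.join [','] ((c :: cs).map (fun c => [c]))
      = c :: cs.flatMap (fun c => [',', c]) := by
  intro c cs
  induction cs generalizing c with
  | nil => simp [PySem.Chars.join, List.intercalate]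
  | cons d rest ih =>
    simp only [List.map_cons] at ih ⊢
    rw [PySem.Chars.join_cons_cons]
    simp [ih d]

-- the two helpers agree
theorem pvGen_eq (n modes : Int) : pvGenA n modes = pvGenAlt n modes := by
  unfold pvGenA pvGenAlt
  by_cases hm : modes ≤ 0
  · have h0 : modes.toNat = 0 := by omega
    have hones : (min (max n 0) modes) = modes := by omega
    rw [h0, hones]
    simp [pvALoop, h0, PySem.Chars.join, List.intercalate]
  · -- 0 < modes: run the first iteration by hand, then pvALoop_pos
    replace hm : 0 < modes := by omega
    have hmn : ((modes.toNat : Int)) = modes := Int.toNat_of_nonneg (by omega)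
    obtain ⟨k, hk⟩ : ∃ k, modes.toNat = k + 1 := ⟨modes.toNat - 1, by omega⟩
    have h1k : (1:Int) + (k:Int) ≤ modes := by omega
    have hrun : pvALoop modes.toNat n 0 modes ['|']
        = '|' :: PySem.Chars.join [','] ((pvBits modes.toNat n).map (fun c => [c])) := by
      rw [hk]
      simp only [pvALoop, if_pos hm, lt_irrefl, if_false, zero_add]
      by_cases hn : 1 ≤ n
      · rw [if_pos hn, pvALoop_pos k (n-1) 1 modes _ one_pos h1k]
        simp only [pvBits, if_pos hn, pvJoin_singletons]
        simp
      · rw [if_neg hn, pvALoop_pos k n 1 modes _ one_pos h1k]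
        simp only [pvBits, if_neg hn, pvJoin_singletons]
        simp
    rw [hrun, pvBits_replicate, hmn]
    simp [List.map_append, List.map_replicate]

-- A's inner fold in closed form
theorem pvAInner_fold : ∀ (l : List Int) (modes : Int) (key : String)
    (pd : PySem.Dict String Int) (all : PySem.Dict String (PySem.Dict String Int)),
    l.foldl (pvAStep modes key) (pd, all)
      = (l.foldl (fun d a => d.insert (pvGenA a modes) (d.getD (pvGenA a modes) 0 + 1)) pd,
         if l = [] then all
         else all.insert key (l.foldl (fun d a => d.insert (pvGenA a modes) (d.getD (pvGenA a modes) 0 + 1)) pd)) := by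
  intro l
  induction l with
  | nil => intro modes key pd all; simp
  | cons a l ih =>
    intro modes key pd all
    have hbody : pvAStep modes key (pd, all) a
        = (pd.insert (pvGenA a modes) (pd.getD (pvGenA a modes) 0 + 1),
           all.insert key (pd.insert (pvGenA a modes) (pd.getD (pvGenA a modes) 0 + 1))) := by
      unfold pvAStep
      by_cases hc : pd.contains (pvGenA a modes)
      · simp [hc]
      · simp only [Bool.not_eq_true] at hc
        simp [hc, PySem.Dict.getD_of_not_contains _ _ hc]
    rw [List.foldl_cons, hbody, ih]
    rcases eq_or_ne l ([] : List Int) with h | h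
    · simp [h]
    · simp [h, PySem.Dict.insert_insert_self]

-- B's per-partition dict equals A's (both are Counter(states))
theorem pvPart_dict_eq (l : List Int) (modes : Int) :
    l.foldl (fun d a => d.insert (pvGenA a modes) (d.getD (pvGenA a modes) 0 + 1)) PySem.Dict.empty
      = (PySem.List.dedup (l.map (fun a => pvGenAlt a modes))).foldl
          (fun d s => d.insert s (((l.map (fun a => pvGenAlt a modes)).count s : Int))) PySem.Dict.empty := by
  have hmap : l.map (fun a => pvGenA a modes) = l.map (fun a => pvGenAlt a modes) := by
    simp [pvGen_eq]
  set xs := l.map (fun a => pvGenAlt a modes) with hxs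
  have hA := PySem.Dict.foldl_insert_getD_add_one_eq_counter (l.map (fun a => pvGenA a modes))
  rw [List.foldl_map, hmap] at hA
  rw [hA]
  apply PySem.Dict.ext
  rw [PySem.Dict.items_counter]
  have hB := PySem.Dict.items_foldl_insert_fresh (PySem.List.dedup xs) (fun s => s)
      (fun s => ((xs.count s : Int))) PySem.Dict.empty
      (by intro a _; simp [PySem.Dict.contains_empty])
      (by simp)
  have hB' : (List.foldl (fun d s => d.insert s ((xs.count s : Int))) PySem.Dict.empty (PySem.List.dedup xs)).items
      = PySem.Dict.empty.items ++ (PySem.List.dedup xs).map (fun s => (s, (xs.count s : Int))) := hB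
  rw [hB']
  simp [PySem.List.dedup_eq_ofList, PySem.Dict.empty]

-- ===== VERDICT (by name: the statement is the Claim_ definition above) =====
theorem generate_initial_states_spec : Claim_equal_generate_initial_states := by
  intro parts modes _
  unfold Spec_generate_initial_states generate_initial_states generate_initial_states_alt
  congr 1
  congr 1
  apply PySem.List.foldl_congr_mem
  intro all p _
  rcases eq_or_ne p ([] : List Int) with h | h
  · simp [h]
  · have hne : p.isEmpty = false := by simpa [List.isEmpty_iff] using h
    simp only [pvAInner_fold, if_neg h, hne, Bool.false_eq_true, if_false]
    rw [pvPart_dict_eq]
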